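-- pv_equiv track=rewrite | github.com/Arsen1302/Code-copy-detector | TestData/solutions/problem_1625_5.py | solution_1625_5
-- ===== SOURCE A (Python) =====
-- from typing import List
--
-- def solution_1625_5(grid: List[List[int]]) -> int:
--
--     n = len(grid)
--
--     ans = 0
--     for i in range(n):
--         res = []
--         for j in range(n):
--             res = []
--             for k in range(n):
--                 res.append(grid[k][j])
--             if res == grid[i]:
--                 ans += 1
--
--     return ans
-- ===== SOURCE B (Python) =====
-- def solution_1625_5(grid):
--     n = len(grid)
--     cnt = {}
--     for j in range(n):
--         col = tuple(grid[k][j] for k in range(n))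
--         cnt[col] = cnt.get(col, 0) + 1
--     ans = 0
--     for row in grid:
--         ans += cnt.get(tuple(row), 0)
--     return ans
-- ===== Notes on version B (the rewrite author's own statement) =====
-- stated objective: faster
-- what changed: B builds each column once and hashes it in a dict of column counts, then sums the count of each row by a single dict lookup, replacing A's per-(row,column) rebuild-and-compare triple loop.
import Mathlib
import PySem

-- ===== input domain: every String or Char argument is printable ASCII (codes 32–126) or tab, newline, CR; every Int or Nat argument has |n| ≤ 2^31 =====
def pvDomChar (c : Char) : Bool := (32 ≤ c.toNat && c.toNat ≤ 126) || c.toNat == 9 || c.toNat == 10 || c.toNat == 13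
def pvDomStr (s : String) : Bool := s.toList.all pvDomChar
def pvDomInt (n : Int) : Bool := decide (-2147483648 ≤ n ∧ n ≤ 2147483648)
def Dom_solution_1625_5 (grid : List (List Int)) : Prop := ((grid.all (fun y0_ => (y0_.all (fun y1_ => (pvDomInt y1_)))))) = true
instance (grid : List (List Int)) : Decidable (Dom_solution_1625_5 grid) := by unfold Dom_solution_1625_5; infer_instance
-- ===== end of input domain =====

-- B counts column/row matches by building each column once and counting rows via a
-- dictionary of column multiplicities (O(n^2)) instead of A's triple loop (O(n^3)).
-- ===== PORT A =====
def solution_1625_5 (grid : List (List Int)) : Int :=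
  let n : Int := grid.length
  (PySem.List.pyRange 0 n 1).foldl (fun ans i =>
    (PySem.List.pyRange 0 n 1).foldl (fun ans j =>
      let res := (PySem.List.pyRange 0 n 1).foldl
        (fun res k => res ++ [PySem.List.pyGetD (PySem.List.pyGetD grid k []) j 0]) []
      if res = PySem.List.pyGetD grid i [] then ans + 1 else ans) ans) 0

-- ===== PORT B =====
def solution_1625_5_alt (grid : List (List Int)) : Int :=
  let n : Int := grid.length
  let cnt : PySem.Dict (List Int) Int :=
    (PySem.List.pyRange 0 n 1).foldl (fun d j =>
      let col := (PySem.List.pyRange 0 n 1).map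
        (fun k => PySem.List.pyGetD (PySem.List.pyGetD grid k []) j 0)
      d.insert col (d.getD col 0 + 1)) PySem.Dict.empty
  grid.foldl (fun ans row => ans + cnt.getD row 0) 0

-- ===== PRECONDITION & SPEC =====
-- Python A (and B) raise IndexError when some row is shorter than the number of rows.
def Pre_solution_1625_5 (grid : List (List Int)) : Prop :=
  ∀ row ∈ grid, grid.length ≤ row.length
instance (grid : List (List Int)) : Decidable (Pre_solution_1625_5 grid) := by
  unfold Pre_solution_1625_5; infer_instance
def pvWitness_solution_1625_5 : List (List Int) := [[1, 2], [2, 1]]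
def Spec_solution_1625_5 (grid : List (List Int)) (out : Int) : Prop := out = solution_1625_5_alt grid
instance (grid : List (List Int)) (out : Int) : Decidable (Spec_solution_1625_5 grid out) := by unfold Spec_solution_1625_5; infer_instance

-- ===== CLAIM (what is proved, stated in full; the proofs are below) =====
def Claim_equal_solution_1625_5 : Prop := ∀ (grid : List (List Int)), Dom_solution_1625_5 grid → Pre_solution_1625_5 grid → Spec_solution_1625_5 grid (solution_1625_5 grid)

-- ===== LEMMAS AND PROOFS =====

-- A's inner j-loop counts the j with colFn j = v.
theorem foldl_if_eq_count (l : List Int) (f : Int → List Int) (v : List Int) (a : Int) :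
    l.foldl (fun a j => if f j = v then a + 1 else a) a
      = a + ((l.map f).count v : Int) := by
  induction l generalizing a with
  | nil => simp
  | cons x xs ih =>
      simp only [List.foldl_cons, List.map_cons, ih]
      by_cases h : f x = v
      · simp [h]
        ring
      · simp [h]

-- ===== VERDICT (by name: the statement is the Claim_ definition above) =====
theorem solution_1625_5_spec : Claim_equal_solution_1625_5 := by
  intro grid _ _
  unfold Spec_solution_1625_5 solution_1625_5 solution_1625_5_alt
  set n : Int := (grid.length : Int) with hn
  set colFn : Int → List Int := fun j =>
    (PySem.List.pyRange 0 n 1).map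
      (fun k => PySem.List.pyGetD (PySem.List.pyGetD grid k []) j 0) with hcol
  set cols : List (List Int) := (PySem.List.pyRange 0 n 1).map colFn with hcols
  -- B side: the dict is the counter of cols
  have hb : ((PySem.List.pyRange 0 n 1).foldl (fun d j =>
        d.insert (colFn j) (d.getD (colFn j) 0 + 1)) PySem.Dict.empty)
      = PySem.Dict.counter cols := by
    rw [hcols, ← PySem.Dict.foldl_insert_getD_add_one_eq_counter, List.foldl_map]
  -- A side: rewrite res to colFn j, then the j-loop to a count, then the i-loop to a fold over grid
  simp only [PySem.List.foldl_append_singleton_eq_map, List.nil_append]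
  calc (PySem.List.pyRange 0 n 1).foldl (fun ans i =>
        (PySem.List.pyRange 0 n 1).foldl (fun ans j =>
          if colFn j = PySem.List.pyGetD grid i [] then ans + 1 else ans) ans) 0
      = (PySem.List.pyRange 0 n 1).foldl (fun ans i =>
          ans + (cols.count (PySem.List.pyGetD grid i []) : Int)) 0 := by
        have hf : (fun (ans i : Int) => (PySem.List.pyRange 0 n 1).foldl (fun ans j =>
              if colFn j = PySem.List.pyGetD grid i [] then ans + 1 else ans) ans)
            = fun (ans i : Int) => ans + (cols.count (PySem.List.pyGetD grid i []) : Int) := by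
          funext ans i
          rw [foldl_if_eq_count, hcols]
        rw [hf]
    _ = grid.foldl (fun ans row => ans + (cols.count row : Int)) 0 := by
        rw [hn]
        exact PySem.List.foldl_pyRange_zero_pyGetD' grid []
          (fun ans row => ans + (cols.count row : Int)) 0
    _ = grid.foldl (fun ans row =>
          ans + ((PySem.List.pyRange 0 n 1).foldl (fun d j =>
            d.insert (colFn j) (d.getD (colFn j) 0 + 1)) PySem.Dict.empty).getD row 0) 0 := by
        rw [hb]
        have hg : (fun (ans : Int) (row : List Int) =>
              ans + (PySem.Dict.counter cols).getD row 0)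
            = fun (ans : Int) (row : List Int) => ans + (cols.count row : Int) := by
          funext ans row
          rw [PySem.Dict.getD_counter]
        rw [hg]
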